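-- pv_equiv track=rewrite | github.com/s3m3n1s/comp_networks_ITMO | translator.py | potentialcode
-- ===== SOURCE A (Python) =====
-- underscore = '_'  # *2
--
-- line = '|'
--
-- hightscore = '¯'  # *2
--
-- def potentialcode(bit_line):
--     res = ''
--     for i in range(len(bit_line)):
--         if bit_line[i] == '0':
--             res += underscore
--         elif bit_line[i] == '1':
--             res += hightscore
--         if i + 1 != len(bit_line):
--             if bit_line[i + 1] != bit_line[i]:
--                 res += line
--     return res
-- ===== SOURCE B (Python) =====
-- from itertools import groupby
--
-- _GLYPH = {'0': '_', '1': '\u00af'}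
--
-- def potentialcode(bit_line):
--     return '|'.join(_GLYPH.get(c, '') * sum(1 for _ in g)
--                     for c, g in groupby(bit_line))
-- ===== Notes on version B (the rewrite author's own statement) =====
-- stated objective: idiomatic
-- what changed: Replaces the index loop with per-character glyph appends and separator checks by grouping the string into maximal runs with itertools.groupby, rendering each run as its glyph repeated run-length times, and joining the rendered runs so the join supplies exactly one separator per transition.
import Mathlib
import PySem

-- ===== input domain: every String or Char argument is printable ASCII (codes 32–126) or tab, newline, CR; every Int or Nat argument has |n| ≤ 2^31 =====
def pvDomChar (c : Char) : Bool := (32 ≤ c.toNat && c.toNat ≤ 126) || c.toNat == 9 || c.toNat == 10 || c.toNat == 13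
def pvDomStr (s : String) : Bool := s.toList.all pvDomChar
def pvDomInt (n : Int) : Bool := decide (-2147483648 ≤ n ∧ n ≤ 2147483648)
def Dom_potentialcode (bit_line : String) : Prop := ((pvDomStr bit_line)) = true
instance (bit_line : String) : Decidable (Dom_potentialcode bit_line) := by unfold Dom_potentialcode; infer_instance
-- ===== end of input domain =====

-- B renders the string run-by-run (groupby + join) instead of A's per-index loop; idiomatic alternative, same cost.

-- ===== PORT A =====
-- A's loop over i in range(len(bit_line)): bit_line[i] is the head, bit_line[i+1] the
-- head of the remaining suffix, 'i + 1 != len' is 'suffix nonempty'; res is the state.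
def pcLoopA : List Char → List Char → List Char
  | [], res => res
  | c :: rest, res =>
    let res := if c = '0' then res ++ ['_'] else if c = '1' then res ++ ['¯'] else res
    let res := match rest with
      | d :: _ => if d ≠ c then res ++ ['|'] else res
      | [] => res
    pcLoopA rest res

def potentialcode (bit_line : String) : String := String.ofList (pcLoopA bit_line.toList [])

-- ===== PORT B =====
-- run-length grouping of adjacent equal characters (itertools.groupby)
def pcRuns : List Char → List (Char × Nat)
  | [] => []
  | c :: cs => match pcRuns cs with
    | (d, k) :: rest => if c = d then (c, k + 1) :: rest else (c, 1) :: (d, k) :: rest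
    | [] => [(c, 1)]

def pcGlyph (c : Char) : List Char := if c = '0' then ['_'] else if c = '1' then ['¯'] else []

def potentialcode_alt (bit_line : String) : String :=
  String.ofList (PySem.Chars.join ['|']
    ((pcRuns bit_line.toList).map (fun p => (List.replicate p.2 (pcGlyph p.1)).flatten)))

-- ===== PRECONDITION & SPEC =====
def Spec_potentialcode (bit_line : String) (out : String) : Prop := out = potentialcode_alt bit_line
instance (bit_line : String) (out : String) : Decidable (Spec_potentialcode bit_line out) := by unfold Spec_potentialcode; infer_instance

-- ===== CLAIM (what is proved, stated in full; the proofs are below) =====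
def Claim_equal_potentialcode : Prop := ∀ (bit_line : String), Dom_potentialcode bit_line → Spec_potentialcode bit_line (potentialcode bit_line)

-- ===== LEMMAS AND PROOFS =====

-- B's rendered output for a character list
def pcB (cs : List Char) : List Char :=
  PySem.Chars.join ['|'] ((pcRuns cs).map (fun p => (List.replicate p.2 (pcGlyph p.1)).flatten))

theorem pcRuns_head (d : Char) (rest : List Char) :
    ∃ k r, pcRuns (d :: rest) = (d, k) :: r := by
  cases h : pcRuns rest with
  | nil => exact ⟨1, [], by simp [pcRuns, h]⟩
  | cons p r =>
    obtain ⟨e, k⟩ := p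
    by_cases hde : d = e
    · refine ⟨k + 1, r, ?_⟩
      subst hde
      conv_lhs => rw [pcRuns, h]
      simp
    · refine ⟨1, (e, k) :: r, ?_⟩
      conv_lhs => rw [pcRuns, h]
      simp [hde]

theorem join_prepend (sep a x : List Char) (xs : List (List Char)) :
    PySem.Chars.join sep ((a ++ x) :: xs) = a ++ PySem.Chars.join sep (x :: xs) := by
  cases xs with
  | nil => simp [PySem.Chars.join_singleton]
  | cons y ys => simp [PySem.Chars.join_cons_cons]

theorem pcB_cons_same (c : Char) (rest' : List Char) :
    pcB (c :: c :: rest') = pcGlyph c ++ pcB (c :: rest') := by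
  obtain ⟨k, r, hk⟩ := pcRuns_head c rest'
  have h2 : pcRuns (c :: c :: rest') = (c, k + 1) :: r := by
    conv_lhs => rw [pcRuns, hk]
    simp
  unfold pcB
  rw [h2, hk]
  simp only [List.map_cons, List.replicate_succ, List.flatten_cons]
  exact join_prepend _ _ _ _

theorem pcB_cons_diff (c d : Char) (rest' : List Char) (hdc : ¬ c = d) :
    pcB (c :: d :: rest') = pcGlyph c ++ '|' :: pcB (d :: rest') := by
  obtain ⟨k, r, hk⟩ := pcRuns_head d rest'
  have h2 : pcRuns (c :: d :: rest') = (c, 1) :: pcRuns (d :: rest') := by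
    conv_lhs => rw [pcRuns, hk]
    simp [hdc, ← hk]
  unfold pcB
  rw [h2, hk]
  simp only [List.map_cons, PySem.Chars.join_cons_cons, List.replicate_one,
    List.flatten_cons, List.flatten_nil, List.append_nil]
  simp

theorem pcLoopA_eq (cs : List Char) : ∀ res, pcLoopA cs res = res ++ pcB cs := by
  induction cs with
  | nil => intro res; simp [pcLoopA, pcB, pcRuns, PySem.Chars.join_nil]
  | cons c rest ih =>
    intro res
    cases rest with
    | nil =>
      simp only [pcLoopA, pcB, pcRuns, List.map_cons, List.map_nil,
        PySem.Chars.join_singleton, List.replicate_one, List.flatten_cons,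
        List.flatten_nil, List.append_nil, pcGlyph]
      by_cases h0 : c = '0' <;> by_cases h1 : c = '1' <;>
        first
          | (exact absurd (h0 ▸ h1) (by decide))
          | simp [h0, h1]
    | cons d rest' =>
      have step : pcLoopA (c :: d :: rest') res =
          pcLoopA (d :: rest') (res ++ pcGlyph c ++ (if d = c then [] else ['|'])) := by
        conv_lhs => rw [pcLoopA]
        simp only [pcGlyph]
        by_cases h0 : c = '0'
        · subst h0
          by_cases hd : d = '0' <;> simp_all
        · by_cases h1 : c = '1'
          · subst h1
            by_cases hd : d = '1' <;> simp_all
          · by_cases hd : d = c <;> simp_all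
      rw [step, ih]
      by_cases hdc : d = c
      · subst hdc
        rw [pcB_cons_same]
        simp
      · rw [pcB_cons_diff c d rest' (fun h => hdc h.symm)]
        simp [hdc]

-- ===== VERDICT (by name: the statement is the Claim_ definition above) =====
theorem potentialcode_spec : Claim_equal_potentialcode := by
  intro bit_line _
  unfold Spec_potentialcode potentialcode potentialcode_alt
  rw [pcLoopA_eq]
  rfl
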